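-- pv_equiv track=rewrite | github.com/HypoxanthineOvO/Hypo-Research | src/hypo_research/writing/bib_parser.py | _is_balanced_braces
-- ===== SOURCE A (Python) =====
-- def _is_balanced_braces(value: str) -> bool:
--     depth = 0
--     escaped = False
--     for char in value:
--         if escaped:
--             escaped = False
--             continue
--         if char == "\\":
--             escaped = True
--             continue
--         if char == "{":
--             depth += 1
--         elif char == "}":
--             depth -= 1
--             if depth < 0:
--                 return False
--     return depth == 0
-- ===== SOURCE B (Python) =====
-- import re
--
-- def _is_balanced_braces(value: str) -> bool:
--     cleaned = re.sub(r"\\.", "", value, flags=re.DOTALL)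
--     depth = 0
--     for char in cleaned:
--         if char == "{":
--             depth += 1
--         elif char == "}":
--             depth -= 1
--             if depth < 0:
--                 return False
--     return depth == 0
-- ===== Notes on version B (the rewrite author's own statement) =====
-- stated objective: alternative
-- what changed: B splits A's single interleaved escape-tracking state machine into two independent passes: a regex pass that deletes every backslash-escaped pair, followed by a pure depth-counting scan with no escape state.
import Mathlib
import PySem

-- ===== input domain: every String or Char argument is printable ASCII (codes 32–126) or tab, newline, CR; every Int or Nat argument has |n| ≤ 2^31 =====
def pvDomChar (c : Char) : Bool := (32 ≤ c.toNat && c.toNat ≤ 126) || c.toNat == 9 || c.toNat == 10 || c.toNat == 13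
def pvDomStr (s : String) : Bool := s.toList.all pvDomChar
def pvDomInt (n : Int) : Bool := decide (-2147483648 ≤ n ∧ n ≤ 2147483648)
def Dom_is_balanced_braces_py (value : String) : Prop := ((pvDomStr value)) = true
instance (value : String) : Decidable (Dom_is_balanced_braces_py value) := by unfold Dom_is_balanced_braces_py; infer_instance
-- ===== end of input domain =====

-- B replaces A's single interleaved escape-tracking state machine with two passes:
-- strip every escaped pair first, then count brace depth with no escape state (objective: alternative).

-- ===== PORT A =====
-- A's loop: state (depth, escaped), early return False when depth goes negative.
def pvLoopA : List Char → Int → Bool → Bool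
  | [], depth, _ => depth == 0
  | c :: cs, depth, escaped =>
    if escaped then pvLoopA cs depth false
    else if c = '\\' then pvLoopA cs depth true
    else if c = '{' then pvLoopA cs (depth + 1) false
    else if c = '}' then
      if depth - 1 < 0 then false else pvLoopA cs (depth - 1) false
    else pvLoopA cs depth false

def is_balanced_braces_py (value : String) : Bool :=
  pvLoopA value.toList 0 false

-- ===== PORT B =====
-- strip pass: the port of re.sub(r"\\.", "", value, flags=re.DOTALL) — delete each
-- backslash together with the character after it (a trailing lone backslash stays, as in the regex).
def pvStrip : List Char → List Char
  | [] => []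
  | '\\' :: [] => ['\\']
  | '\\' :: _ :: rest => pvStrip rest
  | c :: rest => c :: pvStrip rest

-- count pass: pure depth scan, early False on negative depth
def pvCount : List Char → Int → Bool
  | [], depth => depth == 0
  | c :: cs, depth =>
    if c = '{' then pvCount cs (depth + 1)
    else if c = '}' then
      if depth - 1 < 0 then false else pvCount cs (depth - 1)
    else pvCount cs depth

def is_balanced_braces_py_alt (value : String) : Bool :=
  pvCount (pvStrip value.toList) 0

-- ===== PRECONDITION & SPEC =====
def Spec_is_balanced_braces_py (value : String) (out : Bool) : Prop := out = is_balanced_braces_py_alt value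
instance (value : String) (out : Bool) : Decidable (Spec_is_balanced_braces_py value out) := by unfold Spec_is_balanced_braces_py; infer_instance

-- ===== CLAIM (what is proved, stated in full; the proofs are below) =====
def Claim_equal_is_balanced_braces_py : Prop := ∀ (value : String), Dom_is_balanced_braces_py value → Spec_is_balanced_braces_py value (is_balanced_braces_py value)

-- ===== LEMMAS AND PROOFS =====
theorem loopA_eq_count_strip : ∀ (cs : List Char) (d : Int), pvLoopA cs d false = pvCount (pvStrip cs) d := by
  intro cs
  induction cs using pvStrip.induct with
  | case1 => intro d; simp [pvLoopA, pvStrip, pvCount]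
  | case2 => intro d; simp [pvLoopA, pvStrip, pvCount]
  | case3 c rest ih =>
    intro d
    simp only [pvStrip]
    rw [show pvLoopA ('\\' :: c :: rest) d false = pvLoopA rest d false by simp [pvLoopA]]
    exact ih d
  | case4 c rest h1 h2 ih =>
    intro d
    have hc : c ≠ '\\' := by
      intro h; subst h
      cases rest with
      | nil => exact h1 rfl rfl
      | cons x xs => exact h2 x xs rfl rfl
    simp only [pvStrip, pvLoopA, pvCount, if_neg hc]
    split_ifs <;> simp_all

-- ===== VERDICT (by name: the statement is the Claim_ definition above) =====
theorem is_balanced_braces_py_spec : Claim_equal_is_balanced_braces_py := by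
  intro value _
  unfold Spec_is_balanced_braces_py is_balanced_braces_py is_balanced_braces_py_alt
  exact loopA_eq_count_strip value.toList 0
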